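-- pv_equiv track=rewrite | github.com/Rupsapatra3107/projects | FlamesGame.py | remove_common_chars
-- ===== SOURCE A (Python) =====
-- def remove_common_chars(name1, name2):
--     list1 = list(name1)
--     list2 = list(name2)
--     for char in name1:
--         if char in list2:
--             list1.remove(char)
--             list2.remove(char)
--     return len(list1 + list2)
-- ===== SOURCE B (Python) =====
-- def remove_common_chars(name1, name2):
--     s1 = sorted(name1)
--     s2 = sorted(name2)
--     i = j = 0
--     leftover = 0
--     while i < len(s1) and j < len(s2):
--         if s1[i] == s2[j]:
--             i += 1
--             j += 1
--         elif s1[i] < s2[j]: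
--             leftover += 1
--             i += 1
--         else:
--             leftover += 1
--             j += 1
--     return leftover + (len(s1) - i) + (len(s2) - j)
-- ===== Notes on version B (the rewrite author's own statement) =====
-- stated objective: faster
-- what changed: Replaces A's per-character membership scan and list.remove (quadratic) by sorting both strings once and counting leftovers in a single two-pointer merge pass.
import Mathlib
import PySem

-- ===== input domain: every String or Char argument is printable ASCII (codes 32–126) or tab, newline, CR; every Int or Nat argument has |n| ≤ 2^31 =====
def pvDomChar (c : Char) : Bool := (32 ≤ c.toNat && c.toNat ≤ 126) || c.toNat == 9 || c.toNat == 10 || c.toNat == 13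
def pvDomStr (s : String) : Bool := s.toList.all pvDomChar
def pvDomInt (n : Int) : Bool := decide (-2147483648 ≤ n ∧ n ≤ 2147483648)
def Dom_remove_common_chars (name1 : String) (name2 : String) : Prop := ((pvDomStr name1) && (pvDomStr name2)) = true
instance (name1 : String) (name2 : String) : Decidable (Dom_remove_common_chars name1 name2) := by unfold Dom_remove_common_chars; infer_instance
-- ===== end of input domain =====

-- B replaces A's quadratic remove-by-scan loop with a sort + single two-pointer merge pass (alternative algorithm; return value only, A mutates no argument).

-- ===== PORT A =====
-- the body of A's for-loop: if char in list2: list1.remove(char); list2.remove(char)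
-- (list1.remove never raises here: each char of name1 is still present in list1 when its turn comes;
--  .getD keeps the state unchanged in the unreachable none case)
def pvStepA (st : List Char × List Char) (c : Char) : List Char × List Char :=
  if st.2.contains c then
    ((PySem.List.remove? st.1 c).getD st.1, (PySem.List.remove? st.2 c).getD st.2)
  else st

def remove_common_chars (name1 : String) (name2 : String) : Int :=
  let st := name1.toList.foldl pvStepA (name1.toList, name2.toList)
  ((st.1 ++ st.2).length : Int)

-- ===== PORT B =====
-- the two-pointer while-loop of Source B, as structural recursion on the two sorted lists
def pvMerge : List Char → List Char → Nat
  | [], b => b.length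
  | a :: as, [] => (a :: as).length
  | a :: as, b :: bs =>
    if a = b then pvMerge as bs
    else if a < b then pvMerge as (b :: bs) + 1
    else pvMerge (a :: as) bs + 1

def remove_common_chars_alt (name1 : String) (name2 : String) : Int :=
  (pvMerge (PySem.List.sorted name1.toList (fun x => x) false)
           (PySem.List.sorted name2.toList (fun x => x) false) : Int)

-- ===== PRECONDITION & SPEC =====
def Spec_remove_common_chars (name1 : String) (name2 : String) (out : Int) : Prop := out = remove_common_chars_alt name1 name2
instance (name1 : String) (name2 : String) (out : Int) : Decidable (Spec_remove_common_chars name1 name2 out) := by unfold Spec_remove_common_chars; infer_instance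

-- ===== CLAIM (what is proved, stated in full; the proofs are below) =====
def Claim_equal_remove_common_chars : Prop := ∀ (name1 : String) (name2 : String), Dom_remove_common_chars name1 name2 → Spec_remove_common_chars name1 name2 (remove_common_chars name1 name2)

-- ===== LEMMAS AND PROOFS =====

-- y absent from the left operand drops from a right-hand cons of a multiset intersection
lemma pv_inter_cons_of_neg (l t : Multiset Char) (y : Char) (h : y ∉ l) :
    l ∩ (y ::ₘ t) = l ∩ t := by
  rw [Multiset.inter_comm, Multiset.cons_inter_of_neg _ h, Multiset.inter_comm]

-- A's loop: after folding pvStepA over xs (whose multiset is contained in a), the two leftover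
-- lists' total length plus twice the matched pairs equals the initial total length.
lemma pv_foldA (xs : List Char) : ∀ (a b : List Char),
    (∀ c, xs.count c ≤ a.count c) →
    (xs.foldl pvStepA (a, b)).1.length + (xs.foldl pvStepA (a, b)).2.length
      + 2 * ((↑xs : Multiset Char) ∩ (↑b : Multiset Char)).card
      = a.length + b.length := by
  induction xs with
  | nil => intro a b _; simp
  | cons x xs ih =>
    intro a b h
    by_cases hxb : x ∈ b
    · have hxa : x ∈ a := by
        have hx := h x; rw [List.count_cons] at hx; simp at hx
        exact List.count_pos_iff.mp (by omega)
      have hstep : pvStepA (a, b) x = (a.erase x, b.erase x) := by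
        simp [pvStepA, hxb, PySem.List.remove?_eq_some_erase a x hxa,
              PySem.List.remove?_eq_some_erase b x hxb]
      have hcnt : ∀ c, xs.count c ≤ (a.erase x).count c := by
        intro c
        have hc := h c; rw [List.count_cons] at hc
        rcases eq_or_ne c x with rfl | hne
        · rw [List.count_erase_self]; simp at hc; omega
        · rw [List.count_erase_of_ne hne]; split at hc <;> omega
      have hIH := ih (a.erase x) (b.erase x) hcnt
      have hint : ((↑(x :: xs) : Multiset Char) ∩ (↑b : Multiset Char)).card
          = ((↑xs : Multiset Char) ∩ (↑(b.erase x) : Multiset Char)).card + 1 := by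
        have : (↑(x :: xs) : Multiset Char) = x ::ₘ (↑xs : Multiset Char) := rfl
        rw [this, Multiset.cons_inter_of_pos _ (by simpa using hxb),
            ← Multiset.coe_erase]
        simp
      have hla : (a.erase x).length = a.length - 1 := List.length_erase_of_mem hxa
      have hlb : (b.erase x).length = b.length - 1 := List.length_erase_of_mem hxb
      have hal : 1 ≤ a.length := List.length_pos_of_mem hxa
      have hbl : 1 ≤ b.length := List.length_pos_of_mem hxb
      rw [List.foldl_cons, hstep, hint]
      omega
    · have hstep : pvStepA (a, b) x = (a, b) := by
        simp [pvStepA]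
        intro hc; exact absurd hc hxb
      have hcnt : ∀ c, xs.count c ≤ a.count c := by
        intro c; have hc := h c; rw [List.count_cons] at hc
        split at hc <;> omega
      have hIH := ih a b hcnt
      have hint : ((↑(x :: xs) : Multiset Char) ∩ (↑b : Multiset Char))
          = ((↑xs : Multiset Char) ∩ (↑b : Multiset Char)) := by
        have : (↑(x :: xs) : Multiset Char) = x ::ₘ (↑xs : Multiset Char) := rfl
        rw [this, Multiset.cons_inter_of_neg _ (by simpa using hxb)]
      rw [List.foldl_cons, hstep, hint]
      exact hIH

-- B's merge pass: on two sorted lists, the leftover count plus twice the matched pairs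
-- equals the total length.
lemma pv_merge (a : List Char) : ∀ (b : List Char),
    a.Pairwise (· ≤ ·) → b.Pairwise (· ≤ ·) →
    pvMerge a b + 2 * ((↑a : Multiset Char) ∩ (↑b : Multiset Char)).card
      = a.length + b.length := by
  induction a with
  | nil => intro b _ _; simp [pvMerge]
  | cons x as ih =>
    intro b
    induction b with
    | nil => intro _ _; simp [pvMerge]
    | cons y bs ihb =>
      intro ha hb
      have has : as.Pairwise (· ≤ ·) := ha.tail
      have hbs : bs.Pairwise (· ≤ ·) := hb.tail
      rcases lt_trichotomy x y with hlt | heq | hgt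
      · -- x < y : x is below everything in y :: bs, hence unmatched
        have hx : x ∉ (↑(y :: bs) : Multiset Char) := by
          simp only [Multiset.mem_coe, List.mem_cons]
          rintro (rfl | hm)
          · exact lt_irrefl x hlt
          · exact absurd (List.rel_of_pairwise_cons hb hm) (not_le.mpr hlt)
        have hint : ((↑(x :: as) : Multiset Char) ∩ (↑(y :: bs) : Multiset Char))
            = ((↑as : Multiset Char) ∩ (↑(y :: bs) : Multiset Char)) := by
          have : (↑(x :: as) : Multiset Char) = x ::ₘ (↑as : Multiset Char) := rfl
          rw [this, Multiset.cons_inter_of_neg _ hx]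
        have hIH := ih (y :: bs) has hb
        simp only [pvMerge, if_neg (ne_of_lt hlt), if_pos hlt, hint]
        simp only [List.length_cons] at hIH ⊢
        omega
      · -- heads equal: a matched pair
        subst heq
        have hIH := ih bs has hbs
        have hint : ((↑(x :: as) : Multiset Char) ∩ (↑(x :: bs) : Multiset Char)).card
            = ((↑as : Multiset Char) ∩ (↑bs : Multiset Char)).card + 1 := by
          have h1 : (↑(x :: as) : Multiset Char) = x ::ₘ (↑as : Multiset Char) := rfl
          have h2 : (↑(x :: bs) : Multiset Char) = x ::ₘ (↑bs : Multiset Char) := rfl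
          rw [h1, h2, Multiset.cons_inter_of_pos _ (Multiset.mem_cons_self x _)]
          simp
        rw [show pvMerge (x :: as) (x :: bs) = pvMerge as bs from by simp [pvMerge], hint]
        simp only [List.length_cons] at hIH ⊢
        omega
      · -- y < x : y is below everything in x :: as, hence unmatched
        have hy : y ∉ (↑(x :: as) : Multiset Char) := by
          simp only [Multiset.mem_coe, List.mem_cons]
          rintro (rfl | hm)
          · exact lt_irrefl y hgt
          · exact absurd (List.rel_of_pairwise_cons ha hm) (not_le.mpr hgt)
        have hint : ((↑(x :: as) : Multiset Char) ∩ (↑(y :: bs) : Multiset Char))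
            = ((↑(x :: as) : Multiset Char) ∩ (↑bs : Multiset Char)) := by
          have : (↑(y :: bs) : Multiset Char) = y ::ₘ (↑bs : Multiset Char) := rfl
          rw [this, pv_inter_cons_of_neg _ _ _ hy]
        have hIH := ihb ha hbs
        simp only [pvMerge, if_neg (ne_of_gt hgt), if_neg (not_lt.mpr (le_of_lt hgt)), hint]
        simp only [List.length_cons] at hIH ⊢
        omega

-- ===== VERDICT (by name: the statement is the Claim_ definition above) =====
theorem remove_common_chars_spec : Claim_equal_remove_common_chars := by
  intro name1 name2 _
  unfold Spec_remove_common_chars remove_common_chars remove_common_chars_alt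
  set l1 := name1.toList
  set l2 := name2.toList
  set s1 := PySem.List.sorted l1 (fun x => x) false with hs1
  set s2 := PySem.List.sorted l2 (fun x => x) false with hs2
  have hp1 : s1.Perm l1 := PySem.List.sorted_perm l1 (fun x => x) false
  have hp2 : s2.Perm l2 := PySem.List.sorted_perm l2 (fun x => x) false
  have hm1 : (↑s1 : Multiset Char) = (↑l1 : Multiset Char) := Multiset.coe_eq_coe.mpr hp1
  have hm2 : (↑s2 : Multiset Char) = (↑l2 : Multiset Char) := Multiset.coe_eq_coe.mpr hp2
  have hA := pv_foldA l1 l1 l2 (fun c => le_refl _)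
  have hB := pv_merge s1 s2
    (by simpa using PySem.List.sorted_pairwise l1 (fun x => x))
    (by simpa using PySem.List.sorted_pairwise l2 (fun x => x))
  rw [hm1, hm2, hp1.length_eq, hp2.length_eq] at hB
  simp only [List.length_append]
  omega
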